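-- pv_equiv track=rewrite | github.com/p4vl3n/Travel | Fundamentals/04.  Functions - Exercise/09. Factorial Division.py | factorial_division
-- ===== SOURCE A (Python) =====
-- def factorial_division(x, y):
--     sum_to_divide = 1
--     dividers = 1
--     for num in range(2, x + 1):
--         sum_to_divide *= num
--     for divider in range(2, y + 1):
--         dividers *= divider
--     return f"{sum_to_divide/dividers:.2f}"
-- ===== SOURCE B (Python) =====
-- def factorial_division(x, y):
--     # cancel the common factorial: one integer product over the gap, one float conversion
--     if x >= y:
--         acc = 1
--         for n in range(max(2, y + 1), x + 1):
--             acc *= n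
--         return f"{acc:.2f}"
--     acc = 1
--     for n in range(max(2, x + 1), y + 1):
--         acc *= n
--     return f"{1/acc:.2f}"
-- ===== Notes on version B (the rewrite author's own statement) =====
-- stated objective: faster
-- what changed: Instead of building both full factorials and dividing, B branches on x vs y and multiplies a single integer accumulator over only the cancelled gap range(max(2,min+1), max+1), then formats acc (an exact integer when x>=y) or 1/acc directly; O(|x-y|) bignum multiplications instead of O(x+y), and B raises OverflowError on exactly the same inputs as A since the formatted value is the same rational.
import Mathlib
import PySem

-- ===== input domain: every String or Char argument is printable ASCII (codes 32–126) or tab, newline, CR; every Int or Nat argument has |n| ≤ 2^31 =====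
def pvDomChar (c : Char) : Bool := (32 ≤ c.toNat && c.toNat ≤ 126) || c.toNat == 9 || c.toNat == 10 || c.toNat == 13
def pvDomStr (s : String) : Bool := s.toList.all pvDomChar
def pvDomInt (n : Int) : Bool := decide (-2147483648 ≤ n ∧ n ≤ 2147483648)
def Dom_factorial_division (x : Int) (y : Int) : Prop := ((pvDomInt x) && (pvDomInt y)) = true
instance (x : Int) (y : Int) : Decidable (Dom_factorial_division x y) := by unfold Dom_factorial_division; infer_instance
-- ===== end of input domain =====

-- B cancels the common factorial: one integer product over the gap range instead of two full factorials.


-- ===== PORT A =====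
-- Hand port of Python's `f"{a/b:.2f}"` for integers a, b ≥ 1 with a/b below the double
-- overflow threshold (guaranteed by Pre_).  Python's a/b is the double nearest to the
-- rational a/b (ties to even) and `.2f` rounds that double to 2 decimals, ties to even.
-- Emulated exactly with integer arithmetic: reduce the fraction, locate the binade,
-- round the significand to 53 bits half-to-even, then round value*100 half-to-even.
-- (For subnormal quotients the 53-bit significand is not the true double's, but both
-- are < 0.005 and print "0.00", so the output is still exact.)

-- round half to even of the rational N/D (D > 0)
def pvRHE (N D : Nat) : Nat :=
  let q := N / D
  let r := N % D
  if 2 * r < D then q else if D < 2 * r then q + 1 else if q % 2 = 0 then q else q + 1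

-- does the rational n/d satisfy n/d ≥ 2^t ?
def pvQge (n d : Nat) (t : Int) : Bool :=
  if 0 ≤ t then decide (d * 2 ^ t.toNat ≤ n) else decide (d ≤ n * 2 ^ (-t).toNat)

-- format the reduced fraction n/d (n, d ≥ 1) as Python does for float(n/d) with :.2f
def pvCore (n d : Nat) : String :=
  let t0 : Int := (Nat.log2 n : Int) - (Nat.log2 d : Int)
  let t : Int := if pvQge n d t0 then t0 else t0 - 1        -- t = floor(log2(n/d))
  let s : Int := 52 - t
  let m0 : Nat := if 0 ≤ s then pvRHE (n * 2 ^ s.toNat) d else pvRHE n (d * 2 ^ (-s).toNat)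
  -- the double is m0 * 2^(-s); round its value * 100 to an integer, half to even
  let n100 : Nat := if s ≤ 0 then m0 * 100 * 2 ^ (-s).toNat else pvRHE (m0 * 100) (2 ^ s.toNat)
  PySem.Int.toStr ((n100 / 100 : Nat) : Int) ++ "." ++
    (if n100 % 100 < 10 then "0" ++ PySem.Int.toStr ((n100 % 100 : Nat) : Int)
     else PySem.Int.toStr ((n100 % 100 : Nat) : Int))

def pvDivFmt2 (a b : Int) : String :=
  let g := Nat.gcd a.toNat b.toNat
  pvCore (a.toNat / g) (b.toNat / g)

def factorial_division (x : Int) (y : Int) : String :=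
  let sum_to_divide := (PySem.List.pyRange 2 (x + 1) 1).foldl (fun acc num => acc * num) 1
  let dividers := (PySem.List.pyRange 2 (y + 1) 1).foldl (fun acc divider => acc * divider) 1
  pvDivFmt2 sum_to_divide dividers

-- ===== PORT B =====
-- round half to even of a/b (b > 0); B's own rounder, used by its two formatters
def pvHalfEven (a b : Nat) : Nat :=
  a / b + (if a % b * 2 > b ∨ (a % b * 2 = b ∧ (a / b) % 2 = 1) then 1 else 0)

-- hand port of f"{acc:.2f}" for a positive int acc below the double overflow threshold:
-- float(acc) is acc rounded to 53 significant bits half-to-even (an integer), printed with ".00"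
def pvFmtInt (a : Int) : String :=
  let n := a.toNat
  let e := Nat.log2 n
  if e ≤ 52 then PySem.Int.toStr ((n : Nat) : Int) ++ ".00"
  else PySem.Int.toStr ((pvHalfEven n (2 ^ (e - 52)) * 2 ^ (e - 52) : Nat) : Int) ++ ".00"

-- hand port of f"{1/acc:.2f}" for a positive int acc: for acc ≥ 2 the value is in (0, 1/2],
-- so the result is "0." plus two digits; m is the 53-bit significand of the double 1/acc
-- (value m/2^s; for subnormal 1/acc both that and the true double print "0.00"), and
-- c = round(100 * m / 2^s) half-to-even is the two-digit part (c ≤ 51)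
def pvFmtRecip (a : Int) : String :=
  let k := a.toNat
  if k ≤ 1 then "1.00"
  else
    let j := Nat.log2 k
    let p := if k = 2 ^ j then j else j + 1   -- p = -floor(log2(1/k))
    let s := 52 + p
    let m := pvHalfEven (2 ^ s) k
    let c := pvHalfEven (m * 100) (2 ^ s)
    "0." ++ (if c < 10 then "0" ++ PySem.Int.toStr ((c : Nat) : Int) else PySem.Int.toStr ((c : Nat) : Int))

def factorial_division_alt (x : Int) (y : Int) : String :=
  if x ≥ y then
    let acc := (PySem.List.pyRange (max 2 (y + 1)) (x + 1) 1).foldl (fun a n => a * n) 1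
    pvFmtInt acc
  else
    let acc := (PySem.List.pyRange (max 2 (x + 1)) (y + 1) 1).foldl (fun a n => a * n) 1
    pvFmtRecip acc

-- ===== PRECONDITION & SPEC =====
-- Pre_ holds exactly where Python A returns: A raises OverflowError iff the rational
-- x!/y! reaches the double overflow threshold T = 2^1024 - 2^970 (written as its decimal
-- literal; B raises on exactly the same inputs).  For x < y the quotient is ≤ 1 < T; for
-- x ≥ y it is the product of the integers in [max(2,y+1), x], which has x - max(1,y)
-- factors, each ≥ 2, so it reaches T whenever there are ≥ 1024 factors; the short gap
-- guard only makes the product cheap to decide and excludes nothing extra.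
def Pre_factorial_division (x : Int) (y : Int) : Prop :=
  x < y ∨ (x - max 1 y < 1024 ∧
    (Finset.Icc (max 2 (y + 1)).toNat x.toNat).prod (fun i => i) <
      (179769313486231580793728971405303415079934132710037826936173778980444968292764750946649017977587207096330286416692887910946555547851940402630657488671505820681908902000708383676273854845817711531764475730270069855571366959622842914819860834936475292719074168444365510704342711559699508093042880177904174497792 : Nat))
instance (x : Int) (y : Int) : Decidable (Pre_factorial_division x y) := by unfold Pre_factorial_division; infer_instance
def pvWitness_factorial_division : Int × Int := (5, 2)

def Spec_factorial_division (x : Int) (y : Int) (out : String) : Prop := out = factorial_division_alt x y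
instance (x : Int) (y : Int) (out : String) : Decidable (Spec_factorial_division x y out) := by unfold Spec_factorial_division; infer_instance

-- ===== CLAIM (what is proved, stated in full; the proofs are below) =====
def Claim_equal_factorial_division : Prop := ∀ (x : Int) (y : Int), Dom_factorial_division x y → Pre_factorial_division x y → Spec_factorial_division x y (factorial_division x y)

-- ===== LEMMAS AND PROOFS =====

lemma pvFoldlMul (l : List Int) (i : Int) : l.foldl (fun a n => a * n) i = i * l.prod := by
  induction l generalizing i with
  | nil => simp
  | cons h t ih => simp [List.foldl, ih, List.prod_cons]; ring

lemma pvProdPos (a b : Int) (h : 2 ≤ a) : 0 < (PySem.List.pyRange a b 1).prod := by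
  apply List.prod_pos
  intro x hx
  have := (PySem.List.mem_pyRange_one).1 hx
  omega

lemma pvSplit (x y : Int) (hxy : y ≤ x) :
    (PySem.List.pyRange 2 (x + 1) 1).prod =
      (PySem.List.pyRange (max 2 (y + 1)) (x + 1) 1).prod * (PySem.List.pyRange 2 (y + 1) 1).prod := by
  by_cases hy : y ≤ 1
  · have h1 : PySem.List.pyRange 2 (y + 1) 1 = [] := PySem.List.pyRange_one_eq_nil (by omega)
    have h2 : max 2 (y + 1) = 2 := by omega
    simp [h1, h2]
  · have h2 : max 2 (y + 1) = y + 1 := by omega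
    rw [h2, PySem.List.pyRange_one_append 2 (y + 1) (x + 1) (by omega) (by omega),
        List.prod_append]
    ring

lemma pvToNatMul (p f : Int) (hp : 0 ≤ p) (hf : 0 ≤ f) : (p * f).toNat = p.toNat * f.toNat := by
  have h : ((p.toNat * f.toNat : Nat) : Int) = p * f := by
    push_cast
    rw [Int.toNat_of_nonneg hp, Int.toNat_of_nonneg hf]
  rw [← h, Int.toNat_natCast]

lemma pvScaleLeft (p f : Int) (hp : 0 < p) (hf : 0 < f) :
    pvDivFmt2 (p * f) f = pvCore p.toNat 1 := by
  unfold pvDivFmt2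
  have hmul := pvToNatMul p f (le_of_lt hp) (le_of_lt hf)
  have hfn : 0 < f.toNat := by omega
  have hg : Nat.gcd (p.toNat * f.toNat) f.toNat = f.toNat := by
    have := Nat.gcd_mul_right p.toNat 1 f.toNat
    simpa using this
  simp only [hmul, hg]
  rw [Nat.mul_div_cancel _ hfn, Nat.div_self hfn]

lemma pvScaleRight (p f : Int) (hp : 0 < p) (hf : 0 < f) :
    pvDivFmt2 f (p * f) = pvCore 1 p.toNat := by
  unfold pvDivFmt2
  have hmul := pvToNatMul p f (le_of_lt hp) (le_of_lt hf)
  have hfn : 0 < f.toNat := by omega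
  have hg : Nat.gcd f.toNat (p.toNat * f.toNat) = f.toNat := by
    have := Nat.gcd_mul_right 1 p.toNat f.toNat
    simpa using this
  simp only [hmul, hg]
  rw [Nat.mul_div_cancel _ hfn, Nat.div_self hfn]

-- the two rounders are the same function
lemma pvHalfEven_eq_pvRHE (a b : Nat) : pvHalfEven a b = pvRHE a b := by
  simp only [pvHalfEven, pvRHE]
  split_ifs <;> omega

lemma pvRHE_one (a : Nat) : pvRHE a 1 = a := by
  simp only [pvRHE, Nat.mod_one, Nat.div_one]
  split_ifs <;> omega

lemma pvRHE_exact (n k : Nat) (hk : 0 < k) : pvRHE (n * k) k = n := by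
  simp only [pvRHE, Nat.mul_mod_left, Nat.mul_div_cancel _ hk]
  split_ifs <;> omega

lemma pvRHE_le (a b : Nat) : pvRHE a b ≤ a / b + 1 := by
  simp only [pvRHE]
  split_ifs <;> omega

-- appending "." and two zero digits is appending ".00"
lemma pvDot00 (X : String) : X ++ "." ++ ("0" ++ PySem.Int.toStr ((0 : Nat) : Int)) = X ++ ".00" := by
  have h : ("0" ++ PySem.Int.toStr ((0 : Nat) : Int) : String) = "00" := by decide
  rw [h, String.append_assoc]
  congr 1

-- A's formatter on a reduced fraction (n, 1) agrees with B's integer formatter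
lemma pvCore_one_right (p : Int) (hp : 0 < p) : pvCore p.toNat 1 = pvFmtInt p := by
  unfold pvFmtInt
  have hn : 0 < p.toNat := by omega
  generalize hk : p.toNat = n at hn ⊢
  unfold pvCore pvQge
  have hlog1 : Nat.log2 1 = 0 := by decide
  have hself : 2 ^ Nat.log2 n ≤ n := Nat.log2_self_le (by omega)
  set e := Nat.log2 n with he
  simp only [hlog1, Nat.cast_zero, sub_zero]
  rw [if_pos (by positivity : (0:Int) ≤ (e : Int))]
  rw [if_pos (show decide (1 * 2 ^ ((e:Int)).toNat ≤ n) = true by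
        simp only [Int.toNat_natCast, one_mul, decide_eq_true_eq]; exact hself)]
  by_cases hle : e ≤ 52
  · rw [if_pos (show (0:Int) ≤ 52 - (e:Int) by omega)]
    rw [show ((52 : Int) - (e : Int)).toNat = 52 - e by omega]
    rw [pvRHE_one, if_pos hle]
    by_cases hz : (52 : Int) - (e : Int) ≤ 0
    · have he52 : e = 52 := by omega
      rw [if_pos hz, show ((-((52:Int) - (e:Int))).toNat) = 0 by omega]
      rw [he52]
      simp only [Nat.sub_self, pow_zero, mul_one]
      rw [Nat.mul_div_cancel _ (by norm_num : (0:Nat) < 100), Nat.mul_mod_left]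
      rw [if_pos (by norm_num : (0:Nat) < 10)]
      exact pvDot00 _
    · rw [if_neg hz]
      rw [show n * 2 ^ (52 - e) * 100 = n * 100 * 2 ^ (52 - e) by ring]
      rw [pvRHE_exact _ _ (by positivity)]
      rw [Nat.mul_div_cancel _ (by norm_num : (0:Nat) < 100), Nat.mul_mod_left]
      rw [if_pos (by norm_num : (0:Nat) < 10)]
      exact pvDot00 _
  · rw [if_neg (show ¬ (0:Int) ≤ 52 - (e:Int) by omega)]
    rw [show ((-((52:Int) - (e:Int))).toNat) = e - 52 by omega]
    rw [one_mul, if_neg hle, pvHalfEven_eq_pvRHE]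
    rw [show pvRHE n (2 ^ (e - 52)) * 100 * 2 ^ (e - 52)
          = pvRHE n (2 ^ (e - 52)) * 2 ^ (e - 52) * 100 by ring]
    rw [if_pos (show (52:Int) - (e:Int) ≤ 0 by omega)]
    rw [Nat.mul_div_cancel _ (by norm_num : (0:Nat) < 100), Nat.mul_mod_left]
    rw [if_pos (by norm_num : (0:Nat) < 10)]
    exact pvDot00 _

-- shared two-digit shape of both reciprocal formatters (value in (0,1/2], so "0.dd")
lemma pvRecipShape (k s : Nat) (hk2 : 2 ≤ k) (hs : 7 ≤ s) :
    PySem.Int.toStr ((pvRHE (pvRHE (1 * 2 ^ s) k * 100) (2 ^ s) / 100 : Nat) : Int) ++ "." ++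
      (if pvRHE (pvRHE (1 * 2 ^ s) k * 100) (2 ^ s) % 100 < 10
       then "0" ++ PySem.Int.toStr ((pvRHE (pvRHE (1 * 2 ^ s) k * 100) (2 ^ s) % 100 : Nat) : Int)
       else PySem.Int.toStr ((pvRHE (pvRHE (1 * 2 ^ s) k * 100) (2 ^ s) % 100 : Nat) : Int)) =
    "0." ++ (if pvRHE (pvRHE (2 ^ s) k * 100) (2 ^ s) < 10
       then "0" ++ PySem.Int.toStr ((pvRHE (pvRHE (2 ^ s) k * 100) (2 ^ s) : Nat) : Int)
       else PySem.Int.toStr ((pvRHE (pvRHE (2 ^ s) k * 100) (2 ^ s) : Nat) : Int)) := by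
  rw [one_mul]
  set m := pvRHE (2 ^ s) k with hm
  set c := pvRHE (m * 100) (2 ^ s) with hc
  have hP : 2 ^ s = 2 * 2 ^ (s - 1) := by
    conv_lhs => rw [show s = s - 1 + 1 by omega]
    rw [pow_succ]
    ring
  have h100 : 100 < 2 ^ s :=
    lt_of_lt_of_le (by norm_num : (100:Nat) < 2 ^ 7) (Nat.pow_le_pow_right (by norm_num) hs)
  have hmb : m ≤ 2 ^ (s - 1) + 1 := by
    refine le_trans (pvRHE_le _ _) ?_
    have h1 : 2 ^ s / k ≤ 2 ^ s / 2 := Nat.div_le_div_left hk2 (by norm_num)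
    omega
  have hdiv : m * 100 / 2 ^ s < 51 := Nat.div_lt_of_lt_mul (by omega)
  have hcb : c ≤ 51 := le_trans (pvRHE_le _ _) (by omega)
  rw [Nat.div_eq_of_lt (by omega : c < 100), Nat.mod_eq_of_lt (by omega : c < 100)]
  rw [show PySem.Int.toStr ((0 : Nat) : Int) = "0" from by decide]
  rw [show ("0" ++ "." : String) = "0." from by decide]

-- A's formatter on a reduced fraction (1, k) agrees with B's reciprocal formatter
lemma pvCore_one_left (p : Int) (hp : 0 < p) : pvCore 1 p.toNat = pvFmtRecip p := by
  unfold pvFmtRecip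
  have hn : 0 < p.toNat := by omega
  generalize hk : p.toNat = k at hn ⊢
  by_cases h1 : k ≤ 1
  · have hk1 : k = 1 := by omega
    rw [if_pos h1, hk1]
    decide
  · have hk2 : 2 ≤ k := by omega
    rw [if_neg h1]
    have hj1 : 1 ≤ Nat.log2 k := by
      have := (Nat.le_log2 (by omega : k ≠ 0)).2 (by omega : 2 ^ 1 ≤ k)
      omega
    set j := Nat.log2 k with hj
    have hself : 2 ^ j ≤ k := Nat.log2_self_le (by omega)
    have hlt : k < 2 ^ (j + 1) := Nat.lt_log2_self
    unfold pvCore pvQge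
    have hlog1 : Nat.log2 1 = 0 := by decide
    simp only [hlog1, Nat.cast_zero, zero_sub]
    rw [if_neg (show ¬ (0:Int) ≤ -(j : Int) by omega)]
    by_cases hpow : k = 2 ^ j
    · rw [if_pos (show decide (k ≤ 1 * 2 ^ ((-(-(j:Int))).toNat)) = true by
            simp only [one_mul, decide_eq_true_eq]
            rw [show ((-(-(j:Int))).toNat) = j by omega]
            omega), if_pos hpow]
      rw [if_pos (show (0:Int) ≤ 52 - -(j:Int) by omega)]
      rw [show ((52:Int) - -(j:Int)).toNat = 52 + j by omega]
      rw [if_neg (show ¬ ((52:Int) - -(j:Int) ≤ 0) by omega)]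
      rw [pvHalfEven_eq_pvRHE, pvHalfEven_eq_pvRHE]
      exact pvRecipShape k (52 + j) hk2 (by omega)
    · rw [if_neg (show ¬ (decide (k ≤ 1 * 2 ^ ((-(-(j:Int))).toNat)) = true) by
            simp only [one_mul, decide_eq_true_eq]
            rw [show ((-(-(j:Int))).toNat) = j by omega]
            omega), if_neg hpow]
      rw [if_pos (show (0:Int) ≤ 52 - (-(j:Int) - 1) by omega)]
      rw [show ((52:Int) - (-(j:Int) - 1)).toNat = 52 + (j + 1) by omega]
      rw [if_neg (show ¬ ((52:Int) - (-(j:Int) - 1) ≤ 0) by omega)]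
      rw [pvHalfEven_eq_pvRHE, pvHalfEven_eq_pvRHE]
      exact pvRecipShape k (52 + (j + 1)) hk2 (by omega)

-- ===== VERDICT (by name: the statement is the Claim_ definition above) =====
theorem factorial_division_spec : Claim_equal_factorial_division := by
  intro x y _ _
  unfold Spec_factorial_division factorial_division factorial_division_alt
  simp only [pvFoldlMul, one_mul]
  by_cases hxy : x ≥ y
  · rw [if_pos hxy, pvSplit x y hxy]
    exact (pvScaleLeft _ _ (pvProdPos _ _ (by omega)) (pvProdPos _ _ (by omega))).trans
      (pvCore_one_right _ (pvProdPos _ _ (by omega)))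
  · rw [if_neg hxy, pvSplit y x (by omega)]
    exact (pvScaleRight _ _ (pvProdPos _ _ (by omega)) (pvProdPos _ _ (by omega))).trans
      (pvCore_one_left _ (pvProdPos _ _ (by omega)))
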